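-- pv_equiv track=rewrite | github.com/AbelAlarconOK/INTRODUCCION-PROGRAMACION | INTRODUCCION-PROGRAMACION/INTEGRADOR/TP/funcionesVACIAS.py | procesar
-- ===== SOURCE A (Python) =====
-- def Puntos(candidata):
--  puntos=0
--
--  for i in range(len(candidata)):
--    if candidata[i]=="a"or candidata[i]=="e" or candidata[i]=="i" or candidata[i]=="o" or candidata[i]=="u":
--      puntos+=1
--    elif candidata[i]=="b" or candidata[i]=="c" or candidata[i]=="d" or candidata[i]=="f" or candidata[i]=="g" or candidata[i]=="l" or candidata[i]=="m" or candidata[i]=="n" or candidata[i]=="p" or candidata[i]=="r" or candidata[i]=="s" or candidata[i]=="t" or candidata[i]=="v":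
--     puntos+=2
--    elif candidata[i]=="j" or candidata[i]=="k" or candidata[i]=="q" or candidata[i]=="w" or candidata[i]=="x" or candidata[i]=="y" or candidata[i]=="z":
--     puntos+=5
--  return puntos
--
-- def procesar(lista, candidata, listaIzq, listaMedio, listaDerecha):
--     puntaje=0
--     for i in range(len(lista)):
--         if lista[i]==candidata:
--             puntaje=Puntos(candidata)
--             return puntaje
--     else:
--         return puntaje
-- ===== SOURCE B (Python) =====
-- def procesar(lista, candidata, listaIzq, listaMedio, listaDerecha):
--     if candidata not in lista:
--         return 0
--     # loop inversion: sweep the scoring alphabet group by group, counting how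
--     # often each scoring letter occurs in the word (unlisted letters never visited)
--     return (1 * sum(map(candidata.count, "aeiou"))
--             + 2 * sum(map(candidata.count, "bcdfglmnprstv"))
--             + 5 * sum(map(candidata.count, "jkqwxyz")))
-- ===== Notes on version B (the rewrite author's own statement) =====
-- stated objective: alternative
-- what changed: B inverts the loops: instead of A's per-character scan of the word with a three-way branch chain, B sweeps the three scoring letter groups of the alphabet and sums count-of-letter-in-word per group, weighted 1/2/5; the list scan becomes a membership test.
import Mathlib
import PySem

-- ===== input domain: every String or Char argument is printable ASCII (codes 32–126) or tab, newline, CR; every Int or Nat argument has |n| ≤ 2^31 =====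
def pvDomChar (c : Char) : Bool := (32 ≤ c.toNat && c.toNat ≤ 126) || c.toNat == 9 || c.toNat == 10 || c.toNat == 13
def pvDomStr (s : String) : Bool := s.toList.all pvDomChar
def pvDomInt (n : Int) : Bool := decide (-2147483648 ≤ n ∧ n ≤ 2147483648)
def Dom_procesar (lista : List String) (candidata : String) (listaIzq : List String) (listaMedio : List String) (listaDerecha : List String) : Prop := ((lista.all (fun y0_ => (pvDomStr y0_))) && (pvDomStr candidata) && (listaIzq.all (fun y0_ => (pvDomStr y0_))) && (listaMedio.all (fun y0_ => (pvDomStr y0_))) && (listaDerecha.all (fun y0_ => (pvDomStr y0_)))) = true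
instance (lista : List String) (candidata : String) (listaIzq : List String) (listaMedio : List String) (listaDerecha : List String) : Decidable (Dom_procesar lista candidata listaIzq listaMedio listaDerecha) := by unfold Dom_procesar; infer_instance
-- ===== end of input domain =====

-- B inverts the loops: it sweeps the three scoring letter groups of the alphabet, summing
-- occurrence counts of each letter in the word, instead of A's per-character branch scan
-- (alternative decomposition; return value only, no side effects).

-- ===== PORT A =====
-- helper Puntos: per-index loop over the candidate with chained or-branches
def puntos (candidata : String) : Int :=
  candidata.toList.foldl (fun puntos c =>
    if c = 'a' ∨ c = 'e' ∨ c = 'i' ∨ c = 'o' ∨ c = 'u' then puntos + 1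
    else if c = 'b' ∨ c = 'c' ∨ c = 'd' ∨ c = 'f' ∨ c = 'g' ∨ c = 'l' ∨ c = 'm' ∨ c = 'n' ∨ c = 'p' ∨ c = 'r' ∨ c = 's' ∨ c = 't' ∨ c = 'v' then puntos + 2
    else if c = 'j' ∨ c = 'k' ∨ c = 'q' ∨ c = 'w' ∨ c = 'x' ∨ c = 'y' ∨ c = 'z' then puntos + 5
    else puntos) 0

-- the scan over lista with early return on the first match
def procesarLoop (lista : List String) (candidata : String) : Int :=
  match lista with
  | [] => 0
  | x :: rest => if x = candidata then puntos candidata else procesarLoop rest candidata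

def procesar (lista : List String) (candidata : String) (listaIzq : List String) (listaMedio : List String) (listaDerecha : List String) : Int :=
  procesarLoop lista candidata

-- ===== PORT B =====
-- sum(map(candidata.count, group)): Python str.count with a one-character needle is exactly
-- the character occurrence count, ported as List.count on the code points
def groupCount (candidata : String) (group : List Char) : Int :=
  (group.map (fun c => (candidata.toList.count c : Int))).sum

def procesar_alt (lista : List String) (candidata : String) (listaIzq : List String) (listaMedio : List String) (listaDerecha : List String) : Int :=
  if lista.contains candidata = false then 0
  else 1 * groupCount candidata "aeiou".toList
       + 2 * groupCount candidata "bcdfglmnprstv".toList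
       + 5 * groupCount candidata "jkqwxyz".toList

-- ===== PRECONDITION & SPEC =====
def Spec_procesar (lista : List String) (candidata : String) (listaIzq : List String) (listaMedio : List String) (listaDerecha : List String) (out : Int) : Prop := out = procesar_alt lista candidata listaIzq listaMedio listaDerecha
instance (lista : List String) (candidata : String) (listaIzq : List String) (listaMedio : List String) (listaDerecha : List String) (out : Int) : Decidable (Spec_procesar lista candidata listaIzq listaMedio listaDerecha out) := by unfold Spec_procesar; infer_instance

-- ===== CLAIM (what is proved, stated in full; the proofs are below) =====
def Claim_equal_procesar : Prop := ∀ (lista : List String) (candidata : String) (listaIzq : List String) (listaMedio : List String) (listaDerecha : List String), Dom_procesar lista candidata listaIzq listaMedio listaDerecha → Spec_procesar lista candidata listaIzq listaMedio listaDerecha (procesar lista candidata listaIzq listaMedio listaDerecha)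

-- ===== LEMMAS AND PROOFS =====

-- the per-character points of A's branch chain
def pA (c : Char) : Int :=
  if c = 'a' ∨ c = 'e' ∨ c = 'i' ∨ c = 'o' ∨ c = 'u' then 1
  else if c = 'b' ∨ c = 'c' ∨ c = 'd' ∨ c = 'f' ∨ c = 'g' ∨ c = 'l' ∨ c = 'm' ∨ c = 'n' ∨ c = 'p' ∨ c = 'r' ∨ c = 's' ∨ c = 't' ∨ c = 'v' then 2
  else if c = 'j' ∨ c = 'k' ∨ c = 'q' ∨ c = 'w' ∨ c = 'x' ∨ c = 'y' ∨ c = 'z' then 5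
  else 0

lemma puntos_fold (cs : List Char) (a : Int) :
    cs.foldl (fun puntos c =>
      if c = 'a' ∨ c = 'e' ∨ c = 'i' ∨ c = 'o' ∨ c = 'u' then puntos + 1
      else if c = 'b' ∨ c = 'c' ∨ c = 'd' ∨ c = 'f' ∨ c = 'g' ∨ c = 'l' ∨ c = 'm' ∨ c = 'n' ∨ c = 'p' ∨ c = 'r' ∨ c = 's' ∨ c = 't' ∨ c = 'v' then puntos + 2
      else if c = 'j' ∨ c = 'k' ∨ c = 'q' ∨ c = 'w' ∨ c = 'x' ∨ c = 'y' ∨ c = 'z' then puntos + 5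
      else puntos) a = a + (cs.map pA).sum := by
  induction cs generalizing a with
  | nil => simp
  | cons c cs ih =>
    simp only [List.foldl_cons, List.map_cons, List.sum_cons, ih]
    have : (if c = 'a' ∨ c = 'e' ∨ c = 'i' ∨ c = 'o' ∨ c = 'u' then a + 1
      else if c = 'b' ∨ c = 'c' ∨ c = 'd' ∨ c = 'f' ∨ c = 'g' ∨ c = 'l' ∨ c = 'm' ∨ c = 'n' ∨ c = 'p' ∨ c = 'r' ∨ c = 's' ∨ c = 't' ∨ c = 'v' then a + 2
      else if c = 'j' ∨ c = 'k' ∨ c = 'q' ∨ c = 'w' ∨ c = 'x' ∨ c = 'y' ∨ c = 'z' then a + 5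
      else a) = a + pA c := by
      simp only [pA]; split_ifs <;> omega
    rw [this]; ring

-- a 0/1 indicator summed over the group = the char's multiplicity in the group
lemma sum_indicator (vs : List Char) (x : Char) :
    (vs.map (fun v => if x = v then (1 : Int) else 0)).sum = (vs.count x : Int) := by
  induction vs with
  | nil => simp
  | cons v vs ih =>
    simp only [List.map_cons, List.sum_cons, ih, List.count_cons]
    by_cases h : x = v
    · simp [h]; push_cast; omega
    · simp [h, Ne.symm h]

-- prepending a character to the word bumps a group's sum by the char's multiplicity in the group
lemma groupCount_cons (vs : List Char) (c : Char) (cs : List Char) :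
    ((vs.map (fun v => (((c :: cs).count v : Nat) : Int))).sum)
      = (vs.map (fun v => ((cs.count v : Nat) : Int))).sum + (vs.count c : Int) := by
  induction vs with
  | nil => simp
  | cons v vs ih =>
    simp only [List.map_cons, List.sum_cons, ih, List.count_cons]
    by_cases h : v = c
    · subst h; simp [sum_indicator]; push_cast; ring
    · simp [h, Ne.symm h, sum_indicator]; ring

-- each character's point value = its multiplicity in the three groups, weighted 1/2/5
lemma pA_eq_counts (c : Char) :
    pA c = 1 * ("aeiou".toList.count c : Int)
         + 2 * ("bcdfglmnprstv".toList.count c : Int)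
         + 5 * ("jkqwxyz".toList.count c : Int) := by
  by_cases h : c ∈ ['a', 'e', 'i', 'o', 'u', 'b', 'c', 'd', 'f', 'g', 'l', 'm', 'n', 'p',
      'r', 's', 't', 'v', 'j', 'k', 'q', 'w', 'x', 'y', 'z']
  · fin_cases h <;> decide
  · simp only [List.mem_cons, List.not_mem_nil, or_false, not_or] at h
    obtain ⟨h1, h2, h3, h4, h5, h6, h7, h8, h9, h10, h11, h12, h13, h14, h15, h16, h17, h18,
      h19, h20, h21, h22, h23, h24, h25⟩ := h
    have e1 : "aeiou".toList = ['a', 'e', 'i', 'o', 'u'] := rfl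
    have e2 : "bcdfglmnprstv".toList
        = ['b', 'c', 'd', 'f', 'g', 'l', 'm', 'n', 'p', 'r', 's', 't', 'v'] := rfl
    have e3 : "jkqwxyz".toList = ['j', 'k', 'q', 'w', 'x', 'y', 'z'] := rfl
    rw [e1, e2, e3]
    simp [pA, List.count_cons, h1, h2, h3, h4, h5, h6, h7, h8, h9, h10, h11, h12, h13, h14,
      h15, h16, h17, h18, h19, h20, h21, h22, h23, h24, h25,
      Ne.symm h1, Ne.symm h2, Ne.symm h3, Ne.symm h4, Ne.symm h5, Ne.symm h6, Ne.symm h7,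
      Ne.symm h8, Ne.symm h9, Ne.symm h10, Ne.symm h11, Ne.symm h12, Ne.symm h13, Ne.symm h14,
      Ne.symm h15, Ne.symm h16, Ne.symm h17, Ne.symm h18, Ne.symm h19, Ne.symm h20, Ne.symm h21,
      Ne.symm h22, Ne.symm h23, Ne.symm h24, Ne.symm h25]

-- word score = weighted group sums (the loop inversion is sound)
lemma score_eq (cs : List Char) :
    (cs.map pA).sum
      = 1 * (("aeiou".toList.map (fun c => ((cs.count c : Nat) : Int))).sum)
      + 2 * (("bcdfglmnprstv".toList.map (fun c => ((cs.count c : Nat) : Int))).sum)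
      + 5 * (("jkqwxyz".toList.map (fun c => ((cs.count c : Nat) : Int))).sum) := by
  induction cs with
  | nil => simp
  | cons c cs ih =>
    simp only [List.map_cons, List.sum_cons, ih, groupCount_cons]
    rw [pA_eq_counts]; ring

lemma loop_eq (lista : List String) (candidata : String) :
    procesarLoop lista candidata
      = if lista.contains candidata then puntos candidata else 0 := by
  induction lista with
  | nil => simp [procesarLoop]
  | cons x rest ih =>
    by_cases h : x = candidata
    · simp [procesarLoop, h]
    · simp [procesarLoop, h, ih, Ne.symm h]

-- ===== VERDICT (by name: the statement is the Claim_ definition above) =====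
theorem procesar_spec : Claim_equal_procesar := by
  intro lista candidata listaIzq listaMedio listaDerecha _
  unfold Spec_procesar procesar procesar_alt groupCount
  rw [loop_eq]
  cases hb : lista.contains candidata
  · simp [hb]
  · have hp : puntos candidata
        = 1 * (("aeiou".toList.map (fun c => ((candidata.toList.count c : Nat) : Int))).sum)
        + 2 * (("bcdfglmnprstv".toList.map (fun c => ((candidata.toList.count c : Nat) : Int))).sum)
        + 5 * (("jkqwxyz".toList.map (fun c => ((candidata.toList.count c : Nat) : Int))).sum) := by
      unfold puntos; rw [puntos_fold, score_eq]; ring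
    simp [hb, hp]
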